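-- pv_equiv track=rewrite | github.com/Sondanha/coding-test-problem-solving | 프로그래머스/0/120876. 겹치는 선분의 길이/겹치는 선분의 길이.py | solution
-- ===== SOURCE A (Python) =====
-- def solution(lines):
--     answer = 0
--     for i in range(-100,101,1):
--         cnt = 0
--         for x, y in lines:
--             if x<i+1 and i<y: # x <= i,i+1 <=y 경우를 포함해야 함.
--                 cnt += 1
--         if cnt>1:
--             answer += 1
--
--     return answer
-- ===== SOURCE B (Python) =====
-- def solution(lines):
--     diff = {}
--     for x, y in lines:
--         lo = max(x, -100)
--         hi = min(y, 101)
--         if lo < hi: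
--             diff[lo] = diff.get(lo, 0) + 1
--             diff[hi] = diff.get(hi, 0) - 1
--     answer = 0
--     run = 0
--     for i in range(-100, 101):
--         run += diff.get(i, 0)
--         if run > 1:
--             answer += 1
--     return answer
-- ===== Notes on version B (the rewrite author's own statement) =====
-- stated objective: faster
-- what changed: Replaced the 201-position outer loop that rescans all lines per position with a difference-map (diff[lo]+=1, diff[hi]-=1 per line, clamped to the [-100,101) window) followed by a single prefix-sum sweep counting positions with coverage > 1.
import Mathlib
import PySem

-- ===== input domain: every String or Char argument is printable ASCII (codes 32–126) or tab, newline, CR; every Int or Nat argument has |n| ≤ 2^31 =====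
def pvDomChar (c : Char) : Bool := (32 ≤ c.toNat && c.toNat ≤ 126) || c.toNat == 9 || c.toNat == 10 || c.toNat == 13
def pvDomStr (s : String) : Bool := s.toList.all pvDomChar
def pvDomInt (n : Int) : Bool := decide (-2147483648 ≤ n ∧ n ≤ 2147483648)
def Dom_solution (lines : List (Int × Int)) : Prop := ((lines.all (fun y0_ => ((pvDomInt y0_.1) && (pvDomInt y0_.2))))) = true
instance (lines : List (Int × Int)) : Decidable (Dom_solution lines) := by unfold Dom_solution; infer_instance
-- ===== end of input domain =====

-- B replaces A's rescan-all-lines-per-position double loop with a difference map and one prefix-sum sweep (faster by a constant factor; return value proved equal).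

-- ===== PORT A =====
def solution (lines : List (Int × Int)) : Int :=
  (PySem.List.pyRange (-100) 101 1).foldl (fun answer i =>
    let cnt : Int :=
      lines.foldl (fun cnt xy => if xy.1 < i + 1 ∧ i < xy.2 then cnt + 1 else cnt) 0
    if cnt > 1 then answer + 1 else answer) 0

-- ===== PORT B =====
def solution_alt (lines : List (Int × Int)) : Int :=
  let diff : PySem.Dict Int Int :=
    lines.foldl (fun d xy =>
      let lo := max xy.1 (-100)
      let hi := min xy.2 101
      if lo < hi then
        let d1 := d.insert lo (d.getD lo 0 + 1)
        d1.insert hi (d1.getD hi 0 - 1)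
      else d) PySem.Dict.empty
  ((PySem.List.pyRange (-100) 101 1).foldl (fun (s : Int × Int) i =>
    let run := s.2 + diff.getD i 0
    (if run > 1 then s.1 + 1 else s.1, run)) (0, 0)).1

-- ===== PRECONDITION & SPEC =====
def Spec_solution (lines : List (Int × Int)) (out : Int) : Prop := out = solution_alt lines
instance (lines : List (Int × Int)) (out : Int) : Decidable (Spec_solution lines out) := by unfold Spec_solution; infer_instance

-- ===== CLAIM (what is proved, stated in full; the proofs are below) =====
def Claim_equal_solution : Prop := ∀ (lines : List (Int × Int)), Dom_solution lines → Spec_solution lines (solution lines)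

-- ===== LEMMAS AND PROOFS =====

-- per-line contribution of B's diff map at key j
def pvContrib (xy : Int × Int) (j : Int) : Int :=
  if max xy.1 (-100) < min xy.2 101 then
    (if j = max xy.1 (-100) then 1 else 0) + (if j = min xy.2 101 then -1 else 0)
  else 0

-- per-line 0/1 coverage indicator at position i (clamped window form)
def pvInd (xy : Int × Int) (i : Int) : Int :=
  if max xy.1 (-100) ≤ i ∧ i < min xy.2 101 then 1 else 0

-- running prefix sum of coverage = number of lines covering unit segment i
def pvPresum (lines : List (Int × Int)) (i : Int) : Int :=
  (lines.map (fun xy => pvInd xy i)).sum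

-- B's diff-building loop, named so lemmas can speak about it
def pvDiff (lines : List (Int × Int)) : PySem.Dict Int Int :=
  lines.foldl (fun d xy =>
    let lo := max xy.1 (-100)
    let hi := min xy.2 101
    if lo < hi then
      let d1 := d.insert lo (d.getD lo 0 + 1)
      d1.insert hi (d1.getD hi 0 - 1)
    else d) PySem.Dict.empty

lemma pvDiff_getD (lines : List (Int × Int)) (j : Int) :
    ∀ d : PySem.Dict Int Int,
      (lines.foldl (fun d xy =>
        let lo := max xy.1 (-100)
        let hi := min xy.2 101
        if lo < hi then
          let d1 := d.insert lo (d.getD lo 0 + 1)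
          d1.insert hi (d1.getD hi 0 - 1)
        else d) d).getD j 0
      = d.getD j 0 + (lines.map (fun xy => pvContrib xy j)).sum := by
  induction lines with
  | nil => intro d; simp
  | cons xy rest ih =>
    intro d
    simp only [List.foldl_cons, List.map_cons, List.sum_cons]
    rw [ih]
    have hstep : ((fun d (xy : Int × Int) =>
        let lo := max xy.1 (-100)
        let hi := min xy.2 101
        if lo < hi then
          let d1 := d.insert lo (d.getD lo 0 + 1)
          d1.insert hi (d1.getD hi 0 - 1)
        else d) d xy).getD j 0 = d.getD j 0 + pvContrib xy j := by
      simp only [pvContrib]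
      by_cases h : max xy.1 (-100) < min xy.2 101
      · rw [if_pos h, if_pos h]
        simp only [PySem.Dict.getD_insert]
        have hne : ¬ (min xy.2 101 = max xy.1 (-100)) := by omega
        split_ifs <;> first | (simp_all; omega) | simp_all
      · rw [if_neg h, if_neg h]; ring
    rw [hstep]; ring

-- pointwise: indicator step equals previous indicator plus diff contribution
lemma pvInd_step (xy : Int × Int) (i : Int) (h1 : -100 ≤ i) (h2 : i ≤ 100) :
    pvInd xy i = pvInd xy (i - 1) + pvContrib xy i := by
  simp only [pvInd, pvContrib]
  split_ifs <;> omega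

lemma pvPresum_step (lines : List (Int × Int)) (i : Int) (h1 : -100 ≤ i) (h2 : i ≤ 100) :
    pvPresum lines i = pvPresum lines (i - 1) + (pvDiff lines).getD i 0 := by
  rw [pvDiff, pvDiff_getD lines i PySem.Dict.empty]
  simp only [PySem.Dict.getD_empty, zero_add, pvPresum]
  have : (lines.map (fun xy => pvInd xy i)).sum
      = (lines.map (fun xy => pvInd xy (i-1) + pvContrib xy i)).sum := by
    congr 1
    exact List.map_congr_left (fun xy _ => pvInd_step xy i h1 h2)
  rw [this, PySem.List.sum_map_add_int]

lemma pvPresum_base (lines : List (Int × Int)) : pvPresum lines (-101) = 0 := by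
  simp only [pvPresum]
  have : lines.map (fun xy => pvInd xy (-101)) = lines.map (fun _ => (0:Int)) := by
    apply List.map_congr_left
    intro xy _
    simp only [pvInd]
    split_ifs with h
    · omega
    · rfl
  rw [this]; simp

-- A's inner count equals the coverage prefix value at i
lemma pvCnt_eq (lines : List (Int × Int)) (i : Int) (h1 : -100 ≤ i) (h2 : i ≤ 100) :
    lines.foldl (fun cnt xy => if xy.1 < i + 1 ∧ i < xy.2 then cnt + 1 else cnt) 0
      = pvPresum lines i := by
  rw [PySem.List.foldl_ite_add_one, pvPresum]
  have hmap : lines.map (fun xy => pvInd xy i)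
      = lines.map (fun xy =>
          if (decide (max xy.1 (-100) ≤ i ∧ i < min xy.2 101)) = true then (1:Int) else 0) := by
    apply List.map_congr_left
    intro xy _
    simp [pvInd]
  rw [hmap, PySem.List.sum_map_ite_one_zero]
  simp only [zero_add]
  congr 1
  apply List.countP_congr
  intro xy _
  simp only [decide_eq_true_eq]
  constructor <;> intro h <;> exact ⟨by omega, by omega⟩

-- the two sweeps agree, given the run accumulator carries the prefix sum
lemma pvLoop (lines : List (Int × Int)) :
    ∀ (k : Nat), k ≤ 201 → ∀ (ans run : Int), run = pvPresum lines (100 - k) →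
      ((PySem.List.pyRange (101 - k) 101 1).foldl (fun (s : Int × Int) i =>
        let run := s.2 + (pvDiff lines).getD i 0
        (if run > 1 then s.1 + 1 else s.1, run)) (ans, run)).1
      = (PySem.List.pyRange (101 - k) 101 1).foldl (fun answer i =>
          let cnt : Int :=
            lines.foldl (fun cnt xy => if xy.1 < i + 1 ∧ i < xy.2 then cnt + 1 else cnt) 0
          if cnt > 1 then answer + 1 else answer) ans := by
  intro k
  induction k with
  | zero =>
    intro _ ans run _
    rw [PySem.List.pyRange_one_eq_nil (by norm_num)]
    simp [List.foldl_nil]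
  | succ k ih =>
    intro hk ans run hrun
    have ha : (101 - (↑(k+1)) : Int) < 101 := by push_cast; omega
    rw [PySem.List.pyRange_one_cons ha]
    simp only [List.foldl_cons]
    have hbnd1 : -100 ≤ (101 - (↑(k+1)) : Int) := by push_cast; omega
    have hbnd2 : (101 - (↑(k+1)) : Int) ≤ 100 := by push_cast; omega
    have hrun' : run + (pvDiff lines).getD (101 - (↑(k+1))) 0
        = pvPresum lines (101 - (↑(k+1))) := by
      rw [hrun]
      have hst := pvPresum_step lines (101 - (↑(k+1))) hbnd1 hbnd2
      rw [hst]
      congr 2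
      push_cast; ring
    have hcnt := pvCnt_eq lines (101 - (↑(k+1))) hbnd1 hbnd2
    have harg : (101 - (↑(k+1)) : Int) + 1 = 101 - (↑k : Int) := by push_cast; ring
    have hnext : (101 - (↑(k+1)) : Int) = 100 - (↑k : Int) := by push_cast; ring
    rw [hrun', hcnt, harg]
    exact ih (by omega) (if pvPresum lines (101 - (↑(k+1))) > 1 then ans + 1 else ans)
      (pvPresum lines (101 - (↑(k+1)))) (by rw [hnext])

-- ===== VERDICT (by name: the statement is the Claim_ definition above) =====
theorem solution_spec : Claim_equal_solution := by
  intro lines _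
  show solution lines = solution_alt lines
  have hbase : (0 : Int) = pvPresum lines (100 - (201 : Nat)) := by
    have : (100 - ((201:Nat):Int)) = -101 := by norm_num
    rw [this, pvPresum_base lines]
  have h := pvLoop lines 201 (by norm_num) 0 0 hbase
  have hlo : (101 - ((201:Nat):Int)) = -100 := by norm_num
  rw [hlo] at h
  unfold solution solution_alt
  rw [← h]
  rfl
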